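-- pv_equiv track=rewrite | github.com/mutharibayub/Competitive_Programming | adventOfCode/2023/day14/1.py | solve
-- ===== SOURCE A (Python) =====
-- def solve(inp):
--     ans = 0
--
--     grid = inp.split("\n")
--     for i in range(len(grid[0])):
--         cnt = 0
--         for j in range(len(grid)):
--             if grid[j][i] == '.':
--                 cnt += 1
--             elif grid[j][i] == 'O':
--                 new_loc = j - cnt
--                 ans += len(grid) - new_loc
--             elif grid[j][i] == '#':
--                 cnt = 0
--
--     return ans
-- ===== SOURCE B (Python) =====
-- def solve(inp):
--     grid = inp.split("\n")
--     n = len(grid)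
--     total = 0
--     for i in range(len(grid[0])):
--         col = [grid[j][i] for j in range(n)]
--         # split the column into segments at '#' walls
--         segs = []
--         cur = []
--         for c in col:
--             if c == '#':
--                 segs.append(cur)
--                 cur = []
--             else:
--                 cur.append(c)
--         segs.append(cur)
--         # rocks in a segment settle at start, start+1, ...: a rock whose
--         # non-'.' predecessors in the segment number k lands at row start+k
--         start = 0
--         for seg in segs:
--             nondot = 0
--             for c in seg:
--                 if c == 'O':
--                     total += n - start - nondot
--                 if c != '.':
--                     nondot += 1
--             start += len(seg) + 1
--     return total
-- ===== Notes on version B (the rewrite author's own statement) =====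
-- stated objective: alternative
-- what changed: Instead of a per-cell scan that counts empty cells and places each rock at j minus that count, B extracts each column, splits it into wall-separated segments, and credits each rock a load computed from the segment start plus the number of non-empty cells before it in its segment.
import Mathlib
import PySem

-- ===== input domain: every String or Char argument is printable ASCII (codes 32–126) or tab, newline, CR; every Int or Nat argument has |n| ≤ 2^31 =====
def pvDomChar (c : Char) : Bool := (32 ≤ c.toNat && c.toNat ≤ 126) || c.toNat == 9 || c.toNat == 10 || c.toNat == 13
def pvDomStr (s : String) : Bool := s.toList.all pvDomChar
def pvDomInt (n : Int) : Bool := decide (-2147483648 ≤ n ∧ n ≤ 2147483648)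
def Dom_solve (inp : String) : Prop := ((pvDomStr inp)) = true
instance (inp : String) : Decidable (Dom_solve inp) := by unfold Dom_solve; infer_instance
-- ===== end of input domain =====

-- B replaces A's per-cell empty-counter with a per-column split into '#'-separated
-- segments and a per-segment non-dot counter (alternative decomposition, same cost).


-- ===== PORT A =====
-- A's inner-loop body: state (cnt, ans), cell grid[j][i] read via the shared reader.
def aStep (n : Int) (c : Char) (st : Int × Int) (j : Int) : Int × Int :=
  if c = '.' then (st.1 + 1, st.2)
  else if c = 'O' then (st.1, st.2 + (n - (j - st.1)))
  else if c = '#' then (0, st.2)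
  else st

-- grid[j][i]; totalised with defaults — exact under Pre_solve (no IndexError there)
def readCell (grid : List (List Char)) (j i : Int) : Char :=
  PySem.List.pyGetD (PySem.List.pyGetD grid j []) i ' '

def solve (inp : String) : Int :=
  let grid := PySem.Chars.splitOn inp.toList ['\n']
  let n := PySem.List.len grid
  (PySem.List.pyRange 0 (PySem.List.len (PySem.List.pyGetD grid 0 [])) 1).foldl
    (fun ans i =>
      ((PySem.List.pyRange 0 n 1).foldl (fun st j => aStep n (readCell grid j i) st j)
        ((0 : Int), ans)).2)
    0

-- ===== PORT B =====
-- split a column at '#' walls (port of Source B's segs/cur loop)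
def bSplit (col : List Char) : List (List Char) :=
  let p := col.foldl
    (fun (st : List (List Char) × List Char) c =>
      if c = '#' then (st.1 ++ [st.2], []) else (st.1, st.2 ++ [c]))
    ([], [])
  p.1 ++ [p.2]

-- one segment: state (nondot, total)
def bSeg (n start : Int) (seg : List Char) (nondot total : Int) : Int × Int :=
  seg.foldl
    (fun st c =>
      let st' := if c = 'O' then (st.1, st.2 + (n - start - st.1)) else st
      if c ≠ '.' then (st'.1 + 1, st'.2) else st')
    (nondot, total)

def solve_alt (inp : String) : Int :=
  let grid := PySem.Chars.splitOn inp.toList ['\n']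
  let n := PySem.List.len grid
  (PySem.List.pyRange 0 (PySem.List.len (PySem.List.pyGetD grid 0 [])) 1).foldl
    (fun total i =>
      let col := (PySem.List.pyRange 0 n 1).map (fun j => readCell grid j i)
      ((bSplit col).foldl
        (fun st seg => (st.1 + PySem.List.len seg + 1, (bSeg n st.1 seg 0 st.2).2))
        ((0 : Int), total)).2)
    0

-- ===== PRECONDITION & SPEC =====
-- Pre_ excludes exactly the inputs where Python A raises IndexError: a row shorter
-- than the first row (both programs access grid[j][i] for every i < len(grid[0])).
def Pre_solve (inp : String) : Prop :=
  ((PySem.Chars.splitOn inp.toList ['\n']).all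
    (fun row => decide (((PySem.Chars.splitOn inp.toList ['\n']).headD []).length ≤ row.length))) = true
instance (inp : String) : Decidable (Pre_solve inp) := by unfold Pre_solve; infer_instance

def pvWitness_solve : String := "O.\n..\n#O"

def Spec_solve (inp : String) (out : Int) : Prop := out = solve_alt inp
instance (inp : String) (out : Int) : Decidable (Spec_solve inp out) := by unfold Spec_solve; infer_instance

-- ===== CLAIM (what is proved, stated in full; the proofs are below) =====
def Claim_equal_solve : Prop := ∀ (inp : String), Dom_solve inp → Pre_solve inp → Spec_solve inp (solve inp)

-- ===== LEMMAS AND PROOFS =====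

-- A's column scan, structurally over the column list, carrying row index j
def scanA (n : Int) : Int → List Char → Int × Int → Int
  | _, [], st => st.2
  | j, c :: rest, st => scanA n (j + 1) rest (aStep n c st j)

-- recursive form of bSplit
def segsR : List Char → List (List Char)
  | [] => [[]]
  | c :: rest =>
      if c = '#' then [] :: segsR rest
      else (c :: (segsR rest).headD []) :: (segsR rest).tail

-- B's segment loop as a function of (start, total)
def procSegs (n : Int) (segs : List (List Char)) (start total : Int) : Int :=
  (segs.foldl
    (fun st seg => (st.1 + PySem.List.len seg + 1, (bSeg n st.1 seg 0 st.2).2))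
    (start, total)).2

lemma segsR_ne_nil (cs : List Char) : segsR cs ≠ [] := by
  cases cs <;> simp [segsR] <;> split <;> simp

lemma segsR_cons_exists (cs : List Char) : ∃ s ss, segsR cs = s :: ss := by
  cases h : segsR cs with
  | nil => exact absurd h (segsR_ne_nil cs)
  | cons s ss => exact ⟨s, ss, rfl⟩

lemma bSplit_inv (cs : List Char) : ∀ (segs : List (List Char)) (cur : List Char),
    (let p := cs.foldl
        (fun (st : List (List Char) × List Char) c =>
          if c = '#' then (st.1 ++ [st.2], []) else (st.1, st.2 ++ [c]))
        (segs, cur);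
      p.1 ++ [p.2])
      = segs ++ (cur ++ (segsR cs).headD []) :: (segsR cs).tail := by
  induction cs with
  | nil => intro segs cur; simp [segsR]
  | cons c rest ih =>
      intro segs cur
      obtain ⟨s, ss, hss⟩ := segsR_cons_exists rest
      by_cases h : c = '#'
      · simp only [List.foldl_cons, h, reduceIte, segsR]
        rw [ih]
        simp [hss]
      · simp only [List.foldl_cons, h, reduceIte, segsR]
        rw [ih]
        simp [hss]

lemma bSplit_eq_segsR (cs : List Char) : bSplit cs = segsR cs := by
  obtain ⟨s, ss, hss⟩ := segsR_cons_exists cs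
  have := bSplit_inv cs [] []
  simp only [bSplit] at *
  rw [this, hss]
  simp

lemma bSeg_cons (n start : Int) (c : Char) (seg : List Char) (nondot total : Int) :
    bSeg n start (c :: seg) nondot total =
      bSeg n start seg
        (if c ≠ '.' then nondot + 1 else nondot)
        (if c = 'O' then total + (n - start - nondot) else total) := by
  simp only [bSeg, List.foldl_cons]
  by_cases h1 : c = 'O' <;> by_cases h2 : c = '.' <;> simp_all

lemma procSegs_cons (n : Int) (seg : List Char) (tl : List (List Char)) (start total : Int) :
    procSegs n (seg :: tl) start total
      = procSegs n tl (start + PySem.List.len seg + 1) (bSeg n start seg 0 total).2 := by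
  simp [procSegs]

lemma mainLem (n : Int) (cs : List Char) : ∀ (s0 nondot cnt ans : Int),
    scanA n (s0 + nondot + cnt) cs (cnt, ans)
      = procSegs n (segsR cs).tail
          (s0 + (nondot + cnt) + (((segsR cs).headD []).length : Int) + 1)
          (bSeg n s0 ((segsR cs).headD []) nondot ans).2 := by
  induction cs with
  | nil => intro s0 nondot cnt ans; simp [scanA, segsR, procSegs, bSeg]
  | cons c rest ih =>
      intro s0 nondot cnt ans
      obtain ⟨s, ss, hss⟩ := segsR_cons_exists rest
      by_cases hH : c = '#'
      · subst hH
        have ihx := ih (s0 + nondot + cnt + 1) 0 0 ans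
        rw [hss] at ihx
        simp only [segsR, reduceIte, hss, List.headD_cons, List.tail_cons, procSegs_cons]
        have hb : bSeg n s0 [] nondot ans = (nondot, ans) := rfl
        rw [hb]
        simp only [scanA, aStep, Char.reduceEq, reduceIte, PySem.List.len_eq]
        push_cast [List.length_nil] at ihx ⊢
        ring_nf at ihx ⊢
        exact ihx
      · by_cases hD : c = '.'
        · subst hD
          have ihx := ih s0 nondot (cnt + 1) ans
          rw [hss] at ihx
          simp only [segsR, Char.reduceEq, reduceIte, hss, List.headD_cons, List.tail_cons,
            bSeg_cons, scanA, aStep] at ihx ⊢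
          push_cast [List.length_cons] at ihx ⊢
          ring_nf at ihx ⊢
          exact ihx
        · by_cases hO : c = 'O'
          · subst hO
            have ihx := ih s0 (nondot + 1) cnt (ans + (n - s0 - nondot))
            rw [hss] at ihx
            simp only [segsR, Char.reduceEq, reduceIte, hss, List.headD_cons, List.tail_cons,
              bSeg_cons, scanA, aStep] at ihx ⊢
            push_cast [List.length_cons] at ihx ⊢
            ring_nf at ihx ⊢
            exact ihx
          · have ihx := ih s0 (nondot + 1) cnt ans
            rw [hss] at ihx
            simp only [segsR, if_neg hH, hss, List.headD_cons, List.tail_cons,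
              bSeg_cons, if_neg hD, if_neg hO, if_pos hD, scanA, aStep] at ihx ⊢
            push_cast [List.length_cons] at ihx ⊢
            ring_nf at ihx ⊢
            exact ihx

lemma bridgeA (n : Int) (read : Int → Char) : ∀ (k : Nat) (a : Int) (st : Int × Int),
    ((PySem.List.pyRange a (a + (k : Int)) 1).foldl (fun st j => aStep n (read j) st j) st).2
      = scanA n a ((PySem.List.pyRange a (a + (k : Int)) 1).map read) st := by
  intro k
  induction k with
  | zero =>
      intro a st
      rw [PySem.List.pyRange_one_eq_nil (by omega)]
      simp [scanA]
  | succ m ihm =>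
      intro a st
      rw [PySem.List.pyRange_one_cons (by omega)]
      simp only [List.foldl_cons, List.map_cons, scanA]
      have h2 : a + ((m : Int) + 1) = (a + 1) + (m : Int) := by ring
      have := ihm (a + 1) (aStep n (read a) st a)
      rw [show ((m.succ : Nat) : Int) = (m : Int) + 1 by push_cast; ring, h2]
      exact this

lemma column_eq (n : Int) (grid : List (List Char)) (hn : n = (grid.length : Int)) (i ans : Int) :
    ((PySem.List.pyRange 0 n 1).foldl (fun st j => aStep n (readCell grid j i) st j)
        ((0 : Int), ans)).2
      = ((bSplit ((PySem.List.pyRange 0 n 1).map (fun j => readCell grid j i))).foldl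
          (fun st seg => (st.1 + PySem.List.len seg + 1, (bSeg n st.1 seg 0 st.2).2))
          ((0 : Int), ans)).2 := by
  have h0 : n = 0 + ((grid.length : Nat) : Int) := by omega
  rw [h0]
  rw [bridgeA (0 + ((grid.length : Nat) : Int)) (fun j => readCell grid j i) grid.length 0
    ((0 : Int), ans)]
  set m := 0 + ((grid.length : Nat) : Int) with hm
  set col := (PySem.List.pyRange 0 m 1).map (fun j => readCell grid j i) with hcol
  obtain ⟨s, ss, hss⟩ := segsR_cons_exists col
  have hmain := mainLem m col 0 0 0 ans
  rw [hss] at hmain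
  simp only [List.headD_cons, List.tail_cons] at hmain
  have hrhs : ((bSplit col).foldl
        (fun st seg => (st.1 + PySem.List.len seg + 1, (bSeg m st.1 seg 0 st.2).2))
        ((0 : Int), ans)).2
      = procSegs m (s :: ss) 0 ans := by
    rw [bSplit_eq_segsR, hss]; rfl
  rw [hrhs, procSegs_cons]
  rw [show (0 : Int) + 0 + 0 = 0 by ring] at hmain
  rw [hmain]
  congr 1

theorem solve_eq_alt (inp : String) : solve inp = solve_alt inp := by
  unfold solve solve_alt
  dsimp only
  congr 1
  funext ans i
  exact column_eq _ _ (by simp) i ans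

-- ===== VERDICT (by name: the statement is the Claim_ definition above) =====
theorem solve_spec : Claim_equal_solve := by
  intro inp _ _
  unfold Spec_solve
  exact solve_eq_alt inp
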